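-- pv_equiv track=rewrite | github.com/evanstanderwick/OSU-Ling3802-PhishingEmailFeatures | dataParser.py | findKeywordsBody
-- ===== SOURCE A (Python) =====
-- BODYKEYWORDSSCUTOFF = 1
--
-- def findKeywordsBody(body):
--     #define list of keywords
--     bodyKeys = ['urgent', 'action', 'account', 'ssn', 'account',  ] #add more (from NCBI site)
--     stringWords = body.split()
--     cutoff = BODYKEYWORDSSCUTOFF
--
--     #loop through list and count number of spamWords
--     count = 0
--     for x in stringWords:
--       for y in bodyKeys:
--         if (x == y):
--           count += 1
--
--     #Compare with cutoff
--     if count >= cutoff: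
--       keyWordFeature = "body_keywords:high"
--     else:
--       keyWordFeature = "body_keywords:low"
--
--
--     #return
--     return keyWordFeature
-- ===== SOURCE B (Python) =====
-- def findKeywordsBody(body):
--     keyset = {'urgent', 'action', 'account', 'ssn'}
--     if set(body.split()) & keyset:
--         return "body_keywords:high"
--     return "body_keywords:low"
-- ===== Notes on version B (the rewrite author's own statement) =====
-- stated objective: simpler
-- what changed: Replaced the nested counting loops and the count-vs-cutoff comparison with a single set-intersection existence test (count >= 1 is pure existence since the cutoff is 1 and the duplicate 'account' cannot change that).
import Mathlib
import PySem

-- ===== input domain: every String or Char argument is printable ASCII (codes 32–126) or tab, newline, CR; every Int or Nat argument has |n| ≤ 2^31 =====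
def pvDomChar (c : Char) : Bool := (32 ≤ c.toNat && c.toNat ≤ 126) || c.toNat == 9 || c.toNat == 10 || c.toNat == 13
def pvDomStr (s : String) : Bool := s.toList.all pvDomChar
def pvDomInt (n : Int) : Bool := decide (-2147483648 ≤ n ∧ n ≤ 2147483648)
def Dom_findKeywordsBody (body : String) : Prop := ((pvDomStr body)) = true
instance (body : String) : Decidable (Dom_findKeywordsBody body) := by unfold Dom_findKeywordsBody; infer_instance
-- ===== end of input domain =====

-- B replaces A's nested counting loops with a single set-intersection existence test (simpler; same result since the cutoff is 1).


-- ===== PORT A =====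
def findKeywordsBody (body : String) : String :=
  let bodyKeys : List String := ["urgent", "action", "account", "ssn", "account"]
  let stringWords := PySem.Str.split₀ body
  let cutoff : Int := 1
  let count : Int :=
    stringWords.foldl (fun count x =>
      bodyKeys.foldl (fun count y => if x == y then count + 1 else count) count) 0
  let keyWordFeature := if count ≥ cutoff then "body_keywords:high" else "body_keywords:low"
  keyWordFeature

-- ===== PORT B =====
def findKeywordsBody_alt (body : String) : String :=
  let keyset : PySem.Set String := PySem.Set.ofList ["urgent", "action", "account", "ssn"]
  if PySem.Set.inter (PySem.Set.ofList (PySem.Str.split₀ body)) keyset ≠ [] then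
    "body_keywords:high"
  else
    "body_keywords:low"

-- ===== PRECONDITION & SPEC =====
def Spec_findKeywordsBody (body : String) (out : String) : Prop := out = findKeywordsBody_alt body
instance (body : String) (out : String) : Decidable (Spec_findKeywordsBody body out) := by unfold Spec_findKeywordsBody; infer_instance

-- ===== CLAIM (what is proved, stated in full; the proofs are below) =====
def Claim_equal_findKeywordsBody : Prop := ∀ (body : String), Dom_findKeywordsBody body → Spec_findKeywordsBody body (findKeywordsBody body)

-- ===== LEMMAS AND PROOFS =====

-- the inner loop adds the number of keys equal to x
theorem inner_count (x : String) (l : List String) (c : Int) :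
    l.foldl (fun c y => if x == y then c + 1 else c) c = c + l.count x := by
  induction l generalizing c with
  | nil => simp
  | cons y ys ih =>
    simp only [List.foldl, List.count_cons, ih]
    by_cases h : x = y
    · simp [h]; ring
    · have h' : (y == x) = false := by simp [Ne.symm h]
      simp [h, h']

-- the outer loop's total is ≥ 1 iff some word is a key
theorem outer_exists (keys : List String) (ws : List String) (c : Int) (hc : 0 ≤ c) :
    (1 ≤ ws.foldl (fun c x => keys.foldl (fun c y => if x == y then c + 1 else c) c) c)
      ↔ (1 ≤ c ∨ ∃ w ∈ ws, w ∈ keys) := by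
  induction ws generalizing c with
  | nil => simp
  | cons w ws ih =>
    rw [List.foldl_cons, inner_count]
    have hcnt : 0 ≤ (keys.count w : Int) := by positivity
    rw [ih (c + keys.count w) (by omega)]
    constructor
    · rintro (h | h)
      · by_cases hw : w ∈ keys
        · exact Or.inr ⟨w, by simp [hw]⟩
        · left
          have : keys.count w = 0 := List.count_eq_zero.mpr hw
          omega
      · obtain ⟨v, hv, hvk⟩ := h
        exact Or.inr ⟨v, by simp [hv], hvk⟩
    · rintro (h | ⟨v, hv, hvk⟩)
      · left; omega
      · rcases List.mem_cons.mp hv with rfl | hv'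
        · have : 1 ≤ keys.count v := List.count_pos_iff.mpr hvk
          left; omega
        · exact Or.inr ⟨v, hv', hvk⟩

-- the intersection is nonempty iff some word is in the key set
theorem inter_ne_nil (ws : List String) (keys : List String) :
    PySem.Set.inter (PySem.Set.ofList ws) (PySem.Set.ofList keys) ≠ []
      ↔ ∃ w ∈ ws, w ∈ keys := by
  constructor
  · intro h
    obtain ⟨v, hv⟩ := List.exists_mem_of_ne_nil _ h
    have := (PySem.Set.mem_inter _ _ _).mp hv
    exact ⟨v, (PySem.Set.mem_ofList _ _).mp this.1, (PySem.Set.mem_ofList _ _).mp this.2⟩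
  · rintro ⟨v, hv, hvk⟩ hnil
    have hm : v ∈ PySem.Set.inter (PySem.Set.ofList ws) (PySem.Set.ofList keys) :=
      (PySem.Set.mem_inter _ _ _).mpr ⟨(PySem.Set.mem_ofList _ _).mpr hv, (PySem.Set.mem_ofList _ _).mpr hvk⟩
    rw [hnil] at hm
    simp at hm

-- A's 5-key list (with the duplicate 'account') and B's 4-key list have the same members
theorem keys_mem (w : String) :
    w ∈ (["urgent", "action", "account", "ssn", "account"] : List String)
      ↔ w ∈ (["urgent", "action", "account", "ssn"] : List String) := by
  simp only [List.mem_cons, List.not_mem_nil, or_false]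
  tauto

-- ===== VERDICT (by name: the statement is the Claim_ definition above) =====
theorem findKeywordsBody_spec : Claim_equal_findKeywordsBody := by
  intro body _
  unfold Spec_findKeywordsBody findKeywordsBody findKeywordsBody_alt
  simp only []
  by_cases h : ∃ w ∈ PySem.Str.split₀ body,
      w ∈ (["urgent", "action", "account", "ssn"] : List String)
  · have hA : (1:Int) ≤ (PySem.Str.split₀ body).foldl
        (fun c x => (["urgent", "action", "account", "ssn", "account"] : List String).foldl
          (fun c y => if x == y then c + 1 else c) c) 0 := by
      rw [outer_exists]
      · right
        obtain ⟨w, hw, hwk⟩ := h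
        exact ⟨w, hw, (keys_mem w).mpr hwk⟩
      · omega
    have hB := (inter_ne_nil (PySem.Str.split₀ body) ["urgent", "action", "account", "ssn"]).mpr h
    simp only [ge_iff_le] at *
    rw [if_pos hA, if_pos hB]
  · have hA : ¬ (1:Int) ≤ (PySem.Str.split₀ body).foldl
        (fun c x => (["urgent", "action", "account", "ssn", "account"] : List String).foldl
          (fun c y => if x == y then c + 1 else c) c) 0 := by
      rw [outer_exists _ _ _ (by omega)]
      push Not
      constructor
      · omega
      · intro w hw hwk
        exact h ⟨w, hw, (keys_mem w).mp hwk⟩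
    have hB : ¬ PySem.Set.inter (PySem.Set.ofList (PySem.Str.split₀ body))
        (PySem.Set.ofList ["urgent", "action", "account", "ssn"]) ≠ [] := by
      intro hne
      exact h ((inter_ne_nil _ _).mp hne)
    simp only [ge_iff_le] at *
    rw [if_neg hA, if_neg hB]
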